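-- pv_equiv track=rewrite | github.com/dash1101/RPCortex | Core/launchpad.py | _tilde_expand
-- ===== SOURCE A (Python) =====
-- def _tilde_expand(s, home):
--     """Expand ~ tokens in an argument string.
--
--     Rules (matches sh behaviour):
--       ~/...   → home/...
--       ~        (alone, or followed by space)  → home
--       ~word   → left untouched  (no user-dir expansion)
--     """
--     if not s or '~' not in s:
--         return s
--     home = (home or '/').rstrip('/')
--     result = []
--     i = 0
--     n = len(s)
--     while i < n:
--         if s[i] == '~':
--             nxt = i + 1
--             if nxt == n or s[nxt] in (' ', '\t'):
--                 result.append(home)   # bare ~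
--             elif s[nxt] == '/':
--                 result.append(home)   # ~/path  — the / stays as next char
--             else:
--                 result.append('~')    # ~word — leave alone
--         else:
--             result.append(s[i])
--         i += 1
--     return ''.join(result)
-- ===== SOURCE B (Python) =====
-- def _tilde_expand(s, home):
--     """Expand ~ tokens via split-on-'~' and rejoin (instead of a char-by-char scan)."""
--     home = (home or '/').rstrip('/')
--     parts = s.split('~')
--     out = [parts[0]]
--     last = len(parts) - 1
--     for j in range(1, len(parts)):
--         p = parts[j]
--         if (p == '' and j == last) or p[:1] in (' ', '\t', '/'):
--             out.append(home + p)
--         else: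
--             out.append('~' + p)
--     return ''.join(out)
-- ===== Notes on version B (the rewrite author's own statement) =====
-- stated objective: alternative
-- what changed: Replaces A's index-by-index scan with one-char lookahead by splitting the string on '~' once and rejoining the parts, deciding home-vs-'~' from each part's first character (or being the final empty part).
import Mathlib
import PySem

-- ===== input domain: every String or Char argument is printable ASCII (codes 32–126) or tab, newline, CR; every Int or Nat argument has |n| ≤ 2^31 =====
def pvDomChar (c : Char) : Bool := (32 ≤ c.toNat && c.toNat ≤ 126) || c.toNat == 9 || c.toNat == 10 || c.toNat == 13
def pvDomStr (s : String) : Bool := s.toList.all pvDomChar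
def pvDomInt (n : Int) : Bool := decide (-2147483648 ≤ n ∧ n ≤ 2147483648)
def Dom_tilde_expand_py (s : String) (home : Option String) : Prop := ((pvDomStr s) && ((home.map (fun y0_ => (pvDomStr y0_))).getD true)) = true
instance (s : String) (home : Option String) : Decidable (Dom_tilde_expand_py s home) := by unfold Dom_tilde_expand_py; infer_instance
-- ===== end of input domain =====

-- B replaces A's index-by-index scan with split-on-'~' and rejoin (objective: alternative, same cost).

-- ===== PORT A =====
-- (home or '/') : Python treats both None and "" as falsy
def pvHomeOr (home : Option String) : List Char :=
  if ((home.getD "").toList).isEmpty then "/".toList else (home.getD "").toList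

-- .rstrip('/') : drop trailing '/' characters (exact hand port of str.rstrip('/'))
def pvRstripSlash (l : List Char) : List Char :=
  (l.reverse.dropWhile (fun c => c = '/')).reverse

-- the piece A appends at position i: branches in A's order (bare ~ / ~ before space or tab, ~/, ~word, plain char)
def pvPiece (hm : List Char) (c : Char) (rest : List Char) : List Char :=
  if c = '~' then
    match rest with
    | [] => hm
    | d :: _ => if d = ' ' ∨ d = '\t' then hm else if d = '/' then hm else ['~']
  else [c]

-- A's while loop: scan with one-char lookahead (s[i+1] is the head of the remaining list), appending to `result`
def pvALoop (hm : List Char) : List Char → List (List Char) → List (List Char)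
  | [], acc => acc
  | c :: rest, acc => pvALoop hm rest (acc ++ [pvPiece hm c rest])

def tilde_expand_py (s : String) (home : Option String) : String :=
  if s.toList.isEmpty || !(PySem.Str.isIn "~" s) then s
  else
    String.ofList (PySem.Chars.join []
      (pvALoop (pvRstripSlash (pvHomeOr home)) s.toList []))

-- ===== PORT B =====
-- B's loop over parts[1:]; `j == last` is `rest = []` structurally
def pvBLoop (hm : List Char) : List (List Char) → List (List Char)
  | [] => []
  | p :: rest =>
    ((if (p = [] ∧ rest = []) ∨ p.take 1 = [' '] ∨ p.take 1 = ['\t'] ∨ p.take 1 = ['/']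
      then hm else ['~']) ++ p) :: pvBLoop hm rest

def pvBJoin (hm : List Char) (parts : List (List Char)) : String :=
  String.ofList (PySem.Chars.join [] (parts.headI :: pvBLoop hm parts.tail))

def tilde_expand_py_alt (s : String) (home : Option String) : String :=
  pvBJoin (pvRstripSlash (pvHomeOr home)) (PySem.Chars.splitOn s.toList ['~'])

-- ===== PRECONDITION & SPEC =====
def Spec_tilde_expand_py (s : String) (home : Option String) (out : String) : Prop := out = tilde_expand_py_alt s home
instance (s : String) (home : Option String) (out : String) : Decidable (Spec_tilde_expand_py s home out) := by unfold Spec_tilde_expand_py; infer_instance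

-- ===== CLAIM (what is proved, stated in full; the proofs are below) =====
def Claim_equal_tilde_expand_py : Prop := ∀ (s : String) (home : Option String), Dom_tilde_expand_py s home → Spec_tilde_expand_py s home (tilde_expand_py s home)

-- ===== LEMMAS AND PROOFS =====

-- flattened result of A's scan
def pvAFlat (hm : List Char) : List Char → List Char
  | [] => []
  | c :: rest => pvPiece hm c rest ++ pvAFlat hm rest

-- split on the single char '~', directly recursive
def pvSplit1 : List Char → List (List Char)
  | [] => [[]]
  | c :: rest => if c = '~' then [] :: pvSplit1 rest else (pvSplit1 rest).modifyHead (c :: ·)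

theorem pvSplit1_cons (cs : List Char) : ∃ p ps, pvSplit1 cs = p :: ps := by
  cases cs with
  | nil => exact ⟨[], [], rfl⟩
  | cons c rest =>
    obtain ⟨p, ps, h⟩ := pvSplit1_cons rest
    by_cases hc : c = '~'
    · exact ⟨[], pvSplit1 rest, by simp [pvSplit1, hc]⟩
    · exact ⟨c :: p, ps, by simp [pvSplit1, hc, h]⟩

theorem pvJoinNil (ps : List (List Char)) : PySem.Chars.join [] ps = ps.flatten := by
  simp only [PySem.Chars.join, List.intercalate]
  induction ps with
  | nil => rfl
  | cons p ps ih =>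
    cases ps with
    | nil => simp [List.intersperse]
    | cons q qs => simp_all [List.intersperse]

theorem pvSingletonInfix (c : Char) (cs : List Char) : [c] <:+: cs ↔ c ∈ cs := by
  constructor
  · intro h; exact h.subset (by simp)
  · intro h
    obtain ⟨pre, suf, rfl⟩ := List.append_of_mem h
    exact ⟨pre, suf, by simp⟩

theorem pvGoSpec (fuel : Nat) : ∀ (l cur : List Char) (acc : List (List Char)),
    l.length ≤ fuel →
    PySem.Chars.splitOn.go ['~'] fuel l cur acc
      = acc.reverse ++ (pvSplit1 l).modifyHead (cur.reverse ++ ·) := by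
  induction fuel with
  | zero =>
    intro l cur acc h
    have : l = [] := List.eq_nil_of_length_eq_zero (Nat.le_zero.mp h)
    subst this
    simp [PySem.Chars.splitOn.go, pvSplit1]
  | succ fuel ih =>
    intro l cur acc h
    cases l with
    | nil => simp [PySem.Chars.splitOn.go, pvSplit1]
    | cons c rest =>
      by_cases hc : c = '~'
      · subst hc
        have hpre : List.isPrefixOf ['~'] ('~' :: rest) = true := by simp [List.isPrefixOf]
        rw [show PySem.Chars.splitOn.go ['~'] (fuel + 1) ('~' :: rest) cur acc
              = PySem.Chars.splitOn.go ['~'] fuel (List.drop 1 ('~' :: rest)) [] (cur.reverse :: acc) by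
            simp [PySem.Chars.splitOn.go, hpre]]
        rw [ih _ _ _ (by simpa using Nat.le_of_succ_le_succ (by simpa using h))]
        obtain ⟨p, ps, hp⟩ := pvSplit1_cons rest
        simp [pvSplit1, hp]
      · have hpre : List.isPrefixOf ['~'] (c :: rest) = false := by
          simp [List.isPrefixOf]; exact fun hcc => hc hcc.symm
        rw [show PySem.Chars.splitOn.go ['~'] (fuel + 1) (c :: rest) cur acc
              = PySem.Chars.splitOn.go ['~'] fuel rest (c :: cur) acc by
            simp [PySem.Chars.splitOn.go, hpre]]
        rw [ih _ _ _ (by simpa using Nat.le_of_succ_le_succ (by simpa using h))]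
        obtain ⟨p, ps, hp⟩ := pvSplit1_cons rest
        simp [pvSplit1, hc, hp]

theorem pvSplitOnEq (cs : List Char) : PySem.Chars.splitOn cs ['~'] = pvSplit1 cs := by
  have h := pvGoSpec (cs.length + 1) cs [] [] (by omega)
  simp only [PySem.Chars.splitOn]
  rw [h]
  obtain ⟨p, ps, hp⟩ := pvSplit1_cons cs
  simp [hp]

theorem pvALoopFlatten (hm : List Char) (cs : List Char) : ∀ acc,
    (pvALoop hm cs acc).flatten = acc.flatten ++ pvAFlat hm cs := by
  induction cs with
  | nil => intro acc; simp [pvALoop, pvAFlat]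
  | cons c rest ih =>
    intro acc
    simp only [pvALoop, pvAFlat]
    rw [ih]
    simp

-- the heart: A's scan equals B's split-and-rejoin, for any home string hm
theorem pvMain (hm : List Char) (cs : List Char) :
    pvAFlat hm cs = (pvSplit1 cs).headI ++ (pvBLoop hm (pvSplit1 cs).tail).flatten := by
  induction cs with
  | nil => simp [pvAFlat, pvSplit1, pvBLoop]
  | cons c rest ih =>
    by_cases hc : c = '~'
    · subst hc
      rw [show pvSplit1 ('~' :: rest) = [] :: pvSplit1 rest from by rw [pvSplit1]; simp]
      obtain ⟨p, ps, hp⟩ := pvSplit1_cons rest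
      rw [hp] at ih ⊢
      simp only [List.headI_cons, List.tail_cons] at ih ⊢
      have hsel : pvPiece hm '~' rest
          = (if (p = [] ∧ ps = []) ∨ p.take 1 = [' '] ∨ p.take 1 = ['\t'] ∨ p.take 1 = ['/']
             then hm else ['~']) := by
        cases rest with
        | nil =>
          rw [pvSplit1] at hp
          injection hp with h1 h2
          subst h1; subst h2
          simp [pvPiece]
        | cons d r =>
          obtain ⟨q, qs, hq⟩ := pvSplit1_cons r
          by_cases hd : d = '~'
          · subst hd
            rw [show pvSplit1 ('~' :: r) = [] :: pvSplit1 r from by rw [pvSplit1]; simp] at hp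
            injection hp with h1 h2
            subst h1
            rw [hq] at h2
            subst h2
            simp [pvPiece]
          · rw [show pvSplit1 (d :: r) = (d :: q) :: qs from by rw [pvSplit1]; simp [hd, hq]] at hp
            injection hp with h1 h2
            subst h1; subst h2
            by_cases h1 : d = ' ' ∨ d = '\t'
            · rcases h1 with h1 | h1 <;> subst h1 <;> simp [pvPiece]
            · push Not at h1
              by_cases h2 : d = '/'
              · subst h2; simp [pvPiece]
              · simp [pvPiece, h1.1, h1.2, h2]
      rw [show pvAFlat hm ('~' :: rest) = pvPiece hm '~' rest ++ pvAFlat hm rest from by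
            rw [pvAFlat]]
      rw [ih, hsel]
      simp only [pvBLoop, List.flatten_cons, List.nil_append, List.append_assoc]
    · obtain ⟨p, ps, hp⟩ := pvSplit1_cons rest
      rw [hp] at ih
      simp only [List.headI_cons, List.tail_cons] at ih
      rw [show pvSplit1 (c :: rest) = (c :: p) :: ps from by rw [pvSplit1]; simp [hc, hp]]
      rw [show pvAFlat hm (c :: rest) = pvPiece hm c rest ++ pvAFlat hm rest from by rw [pvAFlat]]
      simp only [List.headI_cons, List.tail_cons]
      rw [ih]
      simp [pvPiece, hc]

theorem pvAFlatNoTilde (hm : List Char) (cs : List Char) (h : '~' ∉ cs) :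
    pvAFlat hm cs = cs := by
  induction cs with
  | nil => rfl
  | cons c rest ih =>
    have hc : c ≠ '~' := fun hcc => h (hcc ▸ List.mem_cons_self ..)
    simp only [pvAFlat, pvPiece, hc, if_false]
    simp [ih (fun hr => h (List.mem_cons_of_mem _ hr))]

theorem pvAltEq (s : String) (home : Option String) :
    tilde_expand_py_alt s home
      = String.ofList (pvAFlat (pvRstripSlash (pvHomeOr home)) s.toList) := by
  simp only [tilde_expand_py_alt, pvBJoin, pvJoinNil, pvSplitOnEq, List.flatten_cons]
  rw [pvMain (pvRstripSlash (pvHomeOr home)) s.toList]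

-- ===== VERDICT (by name: the statement is the Claim_ definition above) =====
theorem tilde_expand_py_spec : Claim_equal_tilde_expand_py := by
  intro s home _dom
  unfold Spec_tilde_expand_py
  rw [pvAltEq]
  unfold tilde_expand_py
  by_cases hg : (s.toList.isEmpty || !(PySem.Str.isIn "~" s)) = true
  · rw [if_pos hg]
    have hnt : '~' ∉ s.toList := by
      rcases Bool.or_eq_true_iff.mp hg with h | h
      · simp [List.isEmpty_iff.mp h]
      · have hfalse : PySem.Chars.isIn ['~'] s.toList = false := by simpa using h
        have hninf : ¬ (['~'] <:+: s.toList) :=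
          (PySem.Chars.isIn_eq_false_iff _ _).mp hfalse
        intro hmem
        exact hninf ((pvSingletonInfix '~' s.toList).mpr hmem)
    rw [pvAFlatNoTilde _ _ hnt]
    simp
  · rw [if_neg hg]
    rw [pvJoinNil]
    rw [pvALoopFlatten]
    simp
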